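-- pv_equiv track=rewrite | github.com/ebragas/recruitcrm-mcp | docs/api-reference/_work/tidy.py | drop_duplicate_content_type
-- ===== SOURCE A (Python) =====
-- def drop_duplicate_content_type(paras: list[list[str]]) -> list[list[str]]:
--     """`application/json` often appears twice in a row — keep one."""
--     out = []
--     prev_was_ct = False
--     for p in paras:
--         if len(p) == 1 and p[0].strip() == "application/json":
--             if prev_was_ct:
--                 continue
--             prev_was_ct = True
--         else:
--             prev_was_ct = False
--         out.append(p)
--     return out
-- ===== SOURCE B (Python) =====
-- def drop_duplicate_content_type(paras: list[list[str]]) -> list[list[str]]: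
--     """Keep a paragraph unless it and its predecessor are both content-type paragraphs."""
--     def is_ct(p):
--         return len(p) == 1 and p[0].strip() == "application/json"
--     prevs = [None] + paras
--     return [p for prev, p in zip(prevs, paras)
--             if not (is_ct(p) and prev is not None and is_ct(prev))]
-- ===== Notes on version B (the rewrite author's own statement) =====
-- stated objective: idiomatic
-- what changed: Replaces the stateful prev_was_ct flag loop (with continue) by a stateless zip-with-previous comprehension that keeps a paragraph unless both it and its literal predecessor are content-type paragraphs.
import Mathlib
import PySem

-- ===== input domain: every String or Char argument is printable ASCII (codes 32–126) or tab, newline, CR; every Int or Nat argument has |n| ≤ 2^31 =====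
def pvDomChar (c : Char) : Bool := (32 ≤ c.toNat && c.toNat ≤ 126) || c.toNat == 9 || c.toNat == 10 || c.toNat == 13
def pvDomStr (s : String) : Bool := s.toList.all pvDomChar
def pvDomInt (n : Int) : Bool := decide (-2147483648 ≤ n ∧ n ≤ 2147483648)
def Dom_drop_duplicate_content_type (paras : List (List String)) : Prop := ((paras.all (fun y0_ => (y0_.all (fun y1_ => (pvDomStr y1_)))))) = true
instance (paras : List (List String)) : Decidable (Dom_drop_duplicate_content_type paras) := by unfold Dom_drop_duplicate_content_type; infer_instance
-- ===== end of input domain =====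

-- B replaces A's stateful prev_was_ct flag loop by a stateless zip-with-previous
-- comprehension; same O(n) cost, more idiomatic decomposition.


-- ===== PORT A =====
-- A's test `len(p) == 1 and p[0].strip() == "application/json"` (p[0] only read when len is 1)
def ctTestA (p : List String) : Bool :=
  p.length == 1 &&
    (match PySem.List.pyGet? p 0 with
     | some s => PySem.Str.strip s == "application/json"
     | none => false)

-- A's loop: out accumulates; prev_was_ct is the Bool state; `continue` keeps the flag.
def dropLoopA (paras : List (List String)) (prev_was_ct : Bool) : List (List String) :=
  match paras with
  | [] => []
  | p :: rest =>
    if ctTestA p then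
      if prev_was_ct then dropLoopA rest prev_was_ct
      else p :: dropLoopA rest true
    else p :: dropLoopA rest false

def drop_duplicate_content_type (paras : List (List String)) : List (List String) :=
  dropLoopA paras false

-- ===== PORT B =====
-- B's is_ct predicate
def isCtB (p : List String) : Bool :=
  p.length == 1 &&
    (match p.head? with
     | some s => PySem.Str.strip s == "application/json"
     | none => false)

-- [p for prev, p in zip([None] + paras, paras) if not (is_ct(p) and prev is not None and is_ct(prev))]
def drop_duplicate_content_type_alt (paras : List (List String)) : List (List String) :=
  ((List.zip ((none : Option (List String)) :: paras.map some) paras).filter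
      (fun pr =>
        !(isCtB pr.2 &&
          (match pr.1 with
           | some q => isCtB q
           | none => false)))).map Prod.snd

-- ===== PRECONDITION & SPEC =====
def Spec_drop_duplicate_content_type (paras : List (List String)) (out : List (List String)) : Prop := out = drop_duplicate_content_type_alt paras
instance (paras : List (List String)) (out : List (List String)) : Decidable (Spec_drop_duplicate_content_type paras out) := by unfold Spec_drop_duplicate_content_type; infer_instance

-- ===== CLAIM (what is proved, stated in full; the proofs are below) =====
def Claim_equal_drop_duplicate_content_type : Prop := ∀ (paras : List (List String)), Dom_drop_duplicate_content_type paras → Spec_drop_duplicate_content_type paras (drop_duplicate_content_type paras)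

-- ===== LEMMAS AND PROOFS =====

-- The two content-type tests agree.
theorem ct_eq (p : List String) : ctTestA p = isCtB p := by
  cases p <;> simp [ctTestA, isCtB, PySem.List.pyGet?, PySem.List.pyIdx?]

-- A's flag after processing a prefix equals "the previous element is a ct paragraph";
-- generalize over the optional previous element.
theorem loop_eq (paras : List (List String)) (prev : Option (List String)) :
    dropLoopA paras (match prev with | some q => isCtB q | none => false) =
      ((List.zip (prev :: paras.map some) paras).filter
        (fun pr =>
          !(isCtB pr.2 &&
            (match pr.1 with
             | some q => isCtB q
             | none => false)))).map Prod.snd := by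
  induction paras generalizing prev with
  | nil => cases prev <;> rfl
  | cons p rest ih =>
    have h1 := ih (some p)
    have h2 := ih prev
    cases prev with
    | none =>
      simp only [dropLoopA, ct_eq, List.map_cons, List.zip_cons_cons, List.filter_cons]
      rcases Bool.eq_false_or_eq_true (isCtB p) with hp | hp <;> simp_all
    | some q =>
      simp only [dropLoopA, ct_eq, List.map_cons, List.zip_cons_cons, List.filter_cons]
      rcases Bool.eq_false_or_eq_true (isCtB p) with hp | hp <;>
        rcases Bool.eq_false_or_eq_true (isCtB q) with hq | hq <;>
          simp_all

-- ===== VERDICT (by name: the statement is the Claim_ definition above) =====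
theorem drop_duplicate_content_type_spec : Claim_equal_drop_duplicate_content_type := by
  intro paras _
  show drop_duplicate_content_type paras = drop_duplicate_content_type_alt paras
  simpa [drop_duplicate_content_type, drop_duplicate_content_type_alt] using
    loop_eq paras none
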